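-- pv_equiv track=rewrite | github.com/angelgladin/Criptografia-y-Seguridad | tarea3/src/assets/encontrar_puntos.py | encontrar_puntos
-- ===== SOURCE A (Python) =====
-- def encontrar_puntos(A, B, p):
--     '''Función que encuentra los puntos de la curva tal que
--     satisface la ecuación.
--
--     Ecuación de la curva elíptica de Weierstrass
--         y^2 = x^3 + Ax + B
--
--     Arguments:
--         A {[int]} -- [Constamte de la ecuación]
--         B {[int]} -- [Constamte de la ecuación]
--         p {[int]} -- [Primo del campo Z_p]
--     '''
--
--     # Lista que tendrá los puntos
--     puntos = []
--
--     # Iterar sobre los valores que tomará la x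
--     for i in range(p):
--         # Calcular x^3 + Ax + B módulo p
--         l = (pow(i, 3, p) + (A * i) + B) % p
--         # Iterar sobre los valores que tomará la y
--         for j in range(p):
--             y_2 = pow(j, 2, p)
--             # Verificar si satisface la congruencia
--             if (y_2 - l) % p == 0:
--                 # Agregar el punto
--                 puntos.append((i, j,))
--
--     return puntos
-- ===== SOURCE B (Python) =====
-- def encontrar_puntos(A, B, p):
--     # Group the residues y^2 mod p once, then one dict lookup per x
--     # instead of an inner scan over all y: O(p + output) vs O(p^2).
--     roots = {}
--     for y in range(p):
--         roots.setdefault(pow(y, 2, p), []).append(y)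
--     puntos = []
--     for x in range(p):
--         l = (pow(x, 3, p) + A * x + B) % p
--         for y in roots.get(l, []):
--             puntos.append((x, y))
--     return puntos
-- ===== Notes on version B (the rewrite author's own statement) =====
-- stated objective: faster
-- what changed: Replaced A's inner scan over all y for every x by a dict built once that maps each residue y^2 mod p to its ascending list of y, so each x costs one lookup.
import Mathlib
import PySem

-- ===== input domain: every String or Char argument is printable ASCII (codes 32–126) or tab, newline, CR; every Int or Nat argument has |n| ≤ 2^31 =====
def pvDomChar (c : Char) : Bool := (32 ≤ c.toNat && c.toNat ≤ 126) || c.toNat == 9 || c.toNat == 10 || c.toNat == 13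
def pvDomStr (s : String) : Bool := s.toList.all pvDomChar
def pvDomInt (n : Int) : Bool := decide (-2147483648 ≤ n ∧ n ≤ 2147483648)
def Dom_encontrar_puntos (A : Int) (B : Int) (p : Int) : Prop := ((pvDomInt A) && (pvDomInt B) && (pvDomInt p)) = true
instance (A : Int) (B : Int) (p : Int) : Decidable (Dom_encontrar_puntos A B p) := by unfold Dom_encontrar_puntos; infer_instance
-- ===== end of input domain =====

-- B groups the residues y^2 mod p in a dict once and does one lookup per x, replacing A's inner scan over all y.


-- ===== PORT A =====
def encontrar_puntos (A : Int) (B : Int) (p : Int) : List (Int × Int) :=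
  (PySem.List.pyRange 0 p 1).foldl (fun puntos i =>
    let l := PySem.Int.mod (PySem.Int.powMod i 3 p + A * i + B) p
    (PySem.List.pyRange 0 p 1).foldl (fun puntos j =>
      let y_2 := PySem.Int.powMod j 2 p
      if PySem.Int.mod (y_2 - l) p = 0 then puntos ++ [(i, j)] else puntos) puntos) []

-- ===== PORT B =====
def encontrar_puntos_alt (A : Int) (B : Int) (p : Int) : List (Int × Int) :=
  let roots : PySem.Dict Int (List Int) :=
    (PySem.List.pyRange 0 p 1).foldl (fun d y =>
      d.modify (PySem.Int.powMod y 2 p) [] (fun ys => ys ++ [y])) PySem.Dict.empty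
  (PySem.List.pyRange 0 p 1).foldl (fun puntos x =>
    let l := PySem.Int.mod (PySem.Int.powMod x 3 p + A * x + B) p
    (roots.getD l []).foldl (fun puntos y => puntos ++ [(x, y)]) puntos) []

-- ===== PRECONDITION & SPEC =====
def Spec_encontrar_puntos (A : Int) (B : Int) (p : Int) (out : List (Int × Int)) : Prop := out = encontrar_puntos_alt A B p
instance (A : Int) (B : Int) (p : Int) (out : List (Int × Int)) : Decidable (Spec_encontrar_puntos A B p out) := by unfold Spec_encontrar_puntos; infer_instance

-- ===== CLAIM (what is proved, stated in full; the proofs are below) =====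
def Claim_equal_encontrar_puntos : Prop := ∀ (A : Int) (B : Int) (p : Int), Dom_encontrar_puntos A B p → Spec_encontrar_puntos A B p (encontrar_puntos A B p)

-- ===== LEMMAS AND PROOFS =====

-- a foldl whose body appends a per-element block is the flatMap of the blocks
theorem foldl_block {α β : Type} (xs : List α) (f : List β → α → List β) (g : α → List β)
    (h : ∀ (acc : List β), ∀ x ∈ xs, f acc x = acc ++ g x) :
    ∀ acc, xs.foldl f acc = acc ++ xs.flatMap g := by
  induction xs with
  | nil => intro acc; simp
  | cons x xs ih =>
    intro acc
    simp only [List.foldl_cons, List.flatMap_cons]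
    rw [h acc x (by simp), ih (fun acc y hy => h acc y (by simp [hy])) (acc ++ g x)]
    simp

-- the grouping dict: its entry at r is exactly the filter of the processed list
theorem getD_group (f : Int → Int) (ys : List Int) :
    ∀ (d : PySem.Dict Int (List Int)) (r : Int),
      (ys.foldl (fun d y => d.modify (f y) [] (fun l => l ++ [y])) d).getD r []
        = d.getD r [] ++ ys.filter (fun y => f y == r) := by
  induction ys with
  | nil => intro d r; simp
  | cons y ys ih =>
    intro d r
    simp only [List.foldl_cons, List.filter_cons]
    rw [ih]
    rw [PySem.Dict.getD_modify]
    by_cases hr : r = f y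
    · simp [hr]
    · have hfy : (f y == r) = false := by
        simp only [beq_eq_false_iff_ne, ne_eq]
        exact fun h => hr h.symm
      simp [hr, hfy]

-- A's congruence test equals plain equality of the two residues
theorem cond_eq (p y2 l : Int) (_hp : 0 < p) (hy2 : 0 ≤ y2) (hy2' : y2 < p)
    (hl : 0 ≤ l) (hl' : l < p) :
    (PySem.Int.mod (y2 - l) p = 0) ↔ y2 = l := by
  rw [PySem.Int.mod_eq_zero_iff_dvd]
  constructor
  · intro hdvd
    have := Int.eq_zero_of_abs_lt_dvd hdvd (by rw [abs_lt]; omega)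
    omega
  · intro h; simp [h]

theorem encontrar_puntos_eq_alt (A B p : Int) : encontrar_puntos A B p = encontrar_puntos_alt A B p := by
  by_cases hp : 0 < p
  · unfold encontrar_puntos encontrar_puntos_alt
    have hgroup : ∀ r : Int,
        ((PySem.List.pyRange 0 p 1).foldl (fun d y =>
          d.modify (PySem.Int.powMod y 2 p) [] (fun ys => ys ++ [y])) PySem.Dict.empty).getD r []
        = (PySem.List.pyRange 0 p 1).filter (fun y => PySem.Int.powMod y 2 p == r) := by
      intro r
      rw [getD_group (fun y => PySem.Int.powMod y 2 p) (PySem.List.pyRange 0 p 1) PySem.Dict.empty r]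
      simp
    rw [foldl_block (PySem.List.pyRange 0 p 1) _
        (fun i => ((PySem.List.pyRange 0 p 1).filter
          (fun j => PySem.Int.powMod j 2 p ==
            PySem.Int.mod (PySem.Int.powMod i 3 p + A * i + B) p)).map (fun j => (i, j)))
        ?_ [],
      foldl_block (PySem.List.pyRange 0 p 1) _
        (fun i => ((PySem.List.pyRange 0 p 1).filter
          (fun j => PySem.Int.powMod j 2 p ==
            PySem.Int.mod (PySem.Int.powMod i 3 p + A * i + B) p)).map (fun j => (i, j)))
        ?_ []]
    · -- B's outer body
      intro acc x _
      simp only []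
      rw [hgroup, PySem.List.foldl_append_singleton_eq_map]
    · -- A's outer body: inner fold = append of filter-map
      intro acc i _
      simp only []
      set l := PySem.Int.mod (PySem.Int.powMod i 3 p + A * i + B) p with hldef
      have hl : 0 ≤ l := PySem.Int.mod_nonneg _ hp
      have hl' : l < p := PySem.Int.mod_lt _ hp
      have hbody : ∀ (acc : List (Int × Int)), ∀ j ∈ PySem.List.pyRange 0 p 1,
          (if PySem.Int.mod (PySem.Int.powMod j 2 p - l) p = 0 then acc ++ [(i, j)] else acc)
          = acc ++ (if PySem.Int.powMod j 2 p == l then [(i, j)] else []) := by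
        intro acc j hj
        rw [PySem.List.mem_pyRange_one] at hj
        have hy2 : 0 ≤ PySem.Int.powMod j 2 p := by
          rw [PySem.Int.powMod_eq]; exact PySem.Int.mod_nonneg _ hp
        have hy2' : PySem.Int.powMod j 2 p < p := by
          rw [PySem.Int.powMod_eq]; exact PySem.Int.mod_lt _ hp
        by_cases h : PySem.Int.powMod j 2 p = l
        · simp [h, PySem.Int.mod_eq_emod_of_pos hp]
        · have : ¬ (PySem.Int.mod (PySem.Int.powMod j 2 p - l) p = 0) :=
            fun hc => h ((cond_eq p _ l hp hy2 hy2' hl hl').mp hc)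
          simp [h, this]
      rw [PySem.List.foldl_congr_mem _ _ _ acc hbody,
        PySem.List.foldl_append_eq_flatMap]
      congr 1
      rw [List.flatMap_eq_foldl]
      induction PySem.List.pyRange 0 p 1 with
      | nil => simp
      | cons j js ihj => by_cases h : PySem.Int.powMod j 2 p == l <;> simp_all
  · have hnil : PySem.List.pyRange 0 p 1 = [] := PySem.List.pyRange_one_eq_nil (by omega)
    simp [encontrar_puntos, encontrar_puntos_alt, hnil]

-- ===== VERDICT (by name: the statement is the Claim_ definition above) =====
theorem encontrar_puntos_spec : Claim_equal_encontrar_puntos := by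
  intro A B p _
  unfold Spec_encontrar_puntos
  exact encontrar_puntos_eq_alt A B p
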